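-- pv_equiv track=rewrite | github.com/cuteharvey/file_parse_test | test_files/file_tests/file_methods/parse_file_methods.py | get_largest_word
-- ===== SOURCE A (Python) =====
-- def get_largest_word(lines):
--     # Parameters:
--     # lines = lines to parse
--     temp_largest_word = ""
--     largest_words = []
--     for line in lines:
--         temp_words = line.split(" ")
--         for temp_word in temp_words:
--             if len(temp_word) > len(temp_largest_word):
--                 largest_words = [temp_word]
--                 temp_largest_word = temp_word
--             elif len(temp_word) == len(temp_largest_word):
--                 largest_words.append(temp_word)
--     return largest_words
-- ===== SOURCE B (Python) =====
-- def get_largest_word(lines):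
--     words = [w for line in lines for w in line.split(" ")]
--     if not words:
--         return []
--     m = max(len(w) for w in words)
--     return [w for w in words if len(w) == m]
-- ===== Notes on version B (the rewrite author's own statement) =====
-- stated objective: simpler
-- what changed: Replaces the running-max state machine (rebuilding/appending to a result list word by word) with three plain passes: flatten lines into one word list, take the maximum length, filter the words of that length.
import Mathlib
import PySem

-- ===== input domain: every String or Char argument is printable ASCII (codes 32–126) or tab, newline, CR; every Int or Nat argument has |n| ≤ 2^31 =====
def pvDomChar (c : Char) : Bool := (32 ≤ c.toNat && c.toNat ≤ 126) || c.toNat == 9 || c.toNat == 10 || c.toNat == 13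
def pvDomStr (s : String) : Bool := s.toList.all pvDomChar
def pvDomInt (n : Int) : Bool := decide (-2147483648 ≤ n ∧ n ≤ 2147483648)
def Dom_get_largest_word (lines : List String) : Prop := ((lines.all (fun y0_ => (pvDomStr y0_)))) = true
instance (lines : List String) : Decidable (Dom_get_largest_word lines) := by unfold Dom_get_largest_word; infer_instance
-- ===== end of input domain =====

-- B replaces A's running-max state machine by flatten / max-length / filter; objective: simpler.

-- ===== PORT A =====
-- line.split(" ") with the non-empty literal separator " " never raises, so .getD [] is exact here
def pvSplitWords (line : String) : List String := (PySem.Str.split? line " ").getD []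

-- the body of A's inner loop: state = (temp_largest_word, largest_words)
def pvStep (st : String × List String) (w : String) : String × List String :=
  if PySem.Str.len st.1 < PySem.Str.len w then (w, [w])
  else if PySem.Str.len w = PySem.Str.len st.1 then (st.1, st.2 ++ [w])
  else st

def get_largest_word (lines : List String) : List String :=
  (lines.foldl (fun st line => (pvSplitWords line).foldl pvStep st) ("", [])).2

-- ===== PORT B =====
def get_largest_word_alt (lines : List String) : List String :=
  let words := lines.flatMap (fun line => pvSplitWords line)
  match words with
  | [] => []
  | w :: rest =>
    let m := rest.foldl (fun acc x => max acc (PySem.Str.len x)) (PySem.Str.len w)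
    words.filter (fun x => PySem.Str.len x == m)

-- ===== PRECONDITION & SPEC =====
def Spec_get_largest_word (lines : List String) (out : List String) : Prop := out = get_largest_word_alt lines
instance (lines : List String) (out : List String) : Decidable (Spec_get_largest_word lines out) := by unfold Spec_get_largest_word; infer_instance

-- ===== CLAIM (what is proved, stated in full; the proofs are below) =====
def Claim_equal_get_largest_word : Prop := ∀ (lines : List String), Dom_get_largest_word lines → Spec_get_largest_word lines (get_largest_word lines)

-- ===== LEMMAS AND PROOFS =====

theorem pvLen_nonneg (s : String) : 0 ≤ PySem.Str.len s := by
  rw [PySem.Str.len_eq]; exact Int.natCast_nonneg _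

theorem pvFoldlMax_base_le : ∀ (l : List String) (b : Int),
    b ≤ l.foldl (fun m w => max m (PySem.Str.len w)) b := by
  intro l
  induction l with
  | nil => intro b; simp
  | cons w rest ih =>
    intro b
    simp only [List.foldl_cons]
    exact le_trans (le_max_left _ _) (ih _)

-- the two nested loops of A are one fold of pvStep over the flattened word list
theorem pvFlat : ∀ (lines : List String) (st : String × List String),
    lines.foldl (fun st line => (pvSplitWords line).foldl pvStep st) st
      = (lines.flatMap (fun line => pvSplitWords line)).foldl pvStep st := by
  intro lines
  induction lines with
  | nil => intro st; simp
  | cons l rest ih =>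
    intro st
    simp only [List.foldl_cons, List.flatMap_cons, List.foldl_append]
    exact ih _

-- invariant of A's fold: fst has the running max length; snd is
-- (the carried accumulator, kept only if no strictly longer word appeared) ++ all words of max length
theorem pvKey : ∀ (ws : List String) (b : String) (a : List String),
    PySem.Str.len (ws.foldl pvStep (b, a)).1
        = ws.foldl (fun m w => max m (PySem.Str.len w)) (PySem.Str.len b) ∧
    (ws.foldl pvStep (b, a)).2
        = (if ws.foldl (fun m w => max m (PySem.Str.len w)) (PySem.Str.len b) = PySem.Str.len b
            then a else [])
          ++ ws.filter (fun w => PySem.Str.len w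
                == ws.foldl (fun m w => max m (PySem.Str.len w)) (PySem.Str.len b)) := by
  intro ws
  induction ws with
  | nil => intro b a; simp
  | cons w rest ih =>
    intro b a
    simp only [List.foldl_cons, List.filter_cons]
    by_cases h1 : PySem.Str.len b < PySem.Str.len w
    · have hmax : max (PySem.Str.len b) (PySem.Str.len w) = PySem.Str.len w :=
        max_eq_right (le_of_lt h1)
      have hM : PySem.Str.len w ≤ rest.foldl (fun m w => max m (PySem.Str.len w)) (PySem.Str.len w) :=
        pvFoldlMax_base_le _ _
      obtain ⟨ihf, ihs⟩ := ih w [w]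
      simp only [pvStep, if_pos h1, hmax]
      refine ⟨ihf, ?_⟩
      rw [ihs]
      have hne : ¬ (rest.foldl (fun m w => max m (PySem.Str.len w)) (PySem.Str.len w) = PySem.Str.len b) := by
        omega
      by_cases h2 : rest.foldl (fun m w => max m (PySem.Str.len w)) (PySem.Str.len w) = PySem.Str.len w
      · have hbeq : (PySem.Str.len w == rest.foldl (fun m w => max m (PySem.Str.len w)) (PySem.Str.len w)) = true := by
          simp only [beq_iff_eq]; omega
        rw [if_pos h2, if_neg hne, hbeq, if_pos rfl]
        simp only [List.singleton_append, List.nil_append]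
      · have hbeq : (PySem.Str.len w == rest.foldl (fun m w => max m (PySem.Str.len w)) (PySem.Str.len w)) = false := by
          simp only [beq_eq_false_iff_ne, ne_eq]; omega
        rw [if_neg h2, if_neg hne, hbeq, if_neg Bool.false_ne_true]
    · by_cases h2 : PySem.Str.len w = PySem.Str.len b
      · have hmax : max (PySem.Str.len b) (PySem.Str.len w) = PySem.Str.len b :=
          max_eq_left (by omega)
        obtain ⟨ihf, ihs⟩ := ih b (a ++ [w])
        simp only [pvStep, if_neg h1, if_pos h2, hmax]
        refine ⟨ihf, ?_⟩
        rw [ihs]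
        by_cases h3 : rest.foldl (fun m w => max m (PySem.Str.len w)) (PySem.Str.len b) = PySem.Str.len b
        · have hbeq : (PySem.Str.len w == rest.foldl (fun m w => max m (PySem.Str.len w)) (PySem.Str.len b)) = true := by
            simp only [beq_iff_eq]; omega
          rw [if_pos h3, if_pos h3, hbeq, if_pos rfl]
          simp only [List.append_assoc, List.singleton_append]
        · have hbeq : (PySem.Str.len w == rest.foldl (fun m w => max m (PySem.Str.len w)) (PySem.Str.len b)) = false := by
            simp only [beq_eq_false_iff_ne, ne_eq]; omega
          rw [if_neg h3, if_neg h3, hbeq, if_neg Bool.false_ne_true]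
      · have hmax : max (PySem.Str.len b) (PySem.Str.len w) = PySem.Str.len b :=
          max_eq_left (by omega)
        have hM : PySem.Str.len b ≤ rest.foldl (fun m w => max m (PySem.Str.len w)) (PySem.Str.len b) :=
          pvFoldlMax_base_le _ _
        obtain ⟨ihf, ihs⟩ := ih b a
        simp only [pvStep, if_neg h1, if_neg h2, hmax]
        refine ⟨ihf, ?_⟩
        rw [ihs]
        have hbeq : (PySem.Str.len w == rest.foldl (fun m w => max m (PySem.Str.len w)) (PySem.Str.len b)) = false := by
          simp only [beq_eq_false_iff_ne, ne_eq]; omega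
        rw [hbeq, if_neg Bool.false_ne_true]

-- ===== VERDICT (by name: the statement is the Claim_ definition above) =====
theorem get_largest_word_spec : Claim_equal_get_largest_word := by
  intro lines _
  unfold Spec_get_largest_word get_largest_word get_largest_word_alt
  rw [pvFlat]
  cases hws : lines.flatMap (fun line => pvSplitWords line) with
  | nil => simp
  | cons w rest =>
    obtain ⟨_, hs⟩ := pvKey (w :: rest) "" []
    rw [hs]
    have hb : PySem.Str.len "" = 0 := by decide
    have hbase : max (PySem.Str.len "") (PySem.Str.len w) = PySem.Str.len w := by
      rw [hb]; exact max_eq_right (pvLen_nonneg w)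
    simp only [List.foldl_cons, hbase, ite_self, List.nil_append]
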